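-- pv_equiv track=rewrite | github.com/VittorioRossi/block-agents | block_agents/blocks/rag.py | _fixed_slice
-- ===== SOURCE A (Python) =====
-- from typing import Any, Dict, List, Optional, Set, Tuple
--
-- def _fixed_slice(text: str, slice_size: int, overlap: int) -> List[Tuple[str, int, int]]:
--     """Split text using fixed-size approach.
--
--     Args:
--         text: Text to split
--         slice_size: Size of each slice
--         overlap: Overlap between slices
--
--     Returns:
--         List of (slice_text, start_index, end_index) tuples
--     """
--     # Similar to sliding, but tries to find better boundaries
--     slices = []
--     stride = slice_size - overlap
--
--     for i in range(0, len(text), stride):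
--         start = i
--         end = min(i + slice_size, len(text))
--
--         # Try to find a better boundary (space or punctuation)
--         if end < len(text) and end - start > stride // 2:
--             # Look for a natural break point
--             potential_end = end
--             while potential_end > start + stride // 2:
--                 if text[potential_end] in " \n\t.,:;!?":
--                     end = potential_end + 1
--                     break
--                 potential_end -= 1
--
--         slices.append((text[start:end], start, end))
--
--         # If we've reached the end, break
--         if end == len(text):
--             break
--
--     return slices
-- ===== SOURCE B (Python) =====
-- from bisect import bisect_right
-- from typing import List, Tuple
--
-- _SEPS = " \n\t.,:;!?"
--
-- def _fixed_slice(text: str, slice_size: int, overlap: int) -> List[Tuple[str, int, int]]: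
--     """Split text using fixed-size approach, adjusting boundaries via a
--     precomputed sorted index of separator positions."""
--     seps = [idx for idx, ch in enumerate(text) if ch in _SEPS]
--     slices = []
--     stride = slice_size - overlap
--     half = stride // 2
--
--     for i in range(0, len(text), stride):
--         start = i
--         end = min(i + slice_size, len(text))
--
--         if end < len(text) and end - start > half:
--             j = bisect_right(seps, end)
--             if j > 0 and seps[j - 1] > start + half:
--                 end = seps[j - 1] + 1
--
--         slices.append((text[start:end], start, end))
--
--         if end == len(text):
--             break
--
--     return slices
-- ===== Notes on version B (the rewrite author's own statement) =====
-- stated objective: alternative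
-- what changed: B precomputes one sorted list of all separator positions and finds each window's boundary with a single bisect_right lookup, instead of A's per-window backward character-by-character scan.
import Mathlib
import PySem

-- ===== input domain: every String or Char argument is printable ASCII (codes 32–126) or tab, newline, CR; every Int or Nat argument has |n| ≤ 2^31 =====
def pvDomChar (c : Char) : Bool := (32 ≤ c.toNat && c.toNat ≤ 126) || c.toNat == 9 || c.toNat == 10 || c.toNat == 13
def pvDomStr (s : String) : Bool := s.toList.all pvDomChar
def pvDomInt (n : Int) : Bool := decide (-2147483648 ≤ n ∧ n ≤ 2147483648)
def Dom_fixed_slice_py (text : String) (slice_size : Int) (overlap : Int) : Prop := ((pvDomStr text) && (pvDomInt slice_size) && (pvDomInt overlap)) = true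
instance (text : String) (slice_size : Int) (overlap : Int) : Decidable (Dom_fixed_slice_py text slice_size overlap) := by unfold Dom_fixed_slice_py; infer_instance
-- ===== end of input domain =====

-- B replaces A's per-window backward character scan with one precomputed sorted list of
-- separator positions queried by bisect_right (objective: alternative data structure).

-- the separator set " \n\t.,:;!?" (shared constant of both programs)
def pvIsSep (c : Char) : Bool := [' ', '\n', '\t', '.', ',', ':', ';', '!', '?'].contains c

-- ===== PORT A =====
-- the inner `while potential_end > start + stride//2` backward scan of A
def pvScanA (cs : List Char) (lo : Int) (p : Int) : Option Int :=
  if _h : lo < p then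
    if ((PySem.List.pyGet? cs p).map pvIsSep).getD false then some p
    else pvScanA cs lo (p - 1)
  else none
termination_by (p - lo).toNat
decreasing_by omega

-- the `for i in range(0, len(text), stride)` loop of A, with the `break` as list truncation
def pvLoopA (cs : List Char) (slice_size stride : Int) : List Int → List (String × Int × Int)
  | [] => []
  | i :: rest =>
    let n : Int := cs.length
    let start := i
    let e0 := min (i + slice_size) n
    let e :=
      if e0 < n ∧ e0 - start > PySem.Int.floordiv stride 2 then
        match pvScanA cs (start + PySem.Int.floordiv stride 2) e0 with
        | some p => p + 1
        | none => e0
      else e0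
    (String.ofList (PySem.List.slice cs (some start) (some e)), start, e) ::
      (if e = n then [] else pvLoopA cs slice_size stride rest)

def fixed_slice_py (text : String) (slice_size : Int) (overlap : Int) : List (String × Int × Int) :=
  let cs := text.toList
  let stride := slice_size - overlap
  pvLoopA cs slice_size stride (PySem.List.pyRange 0 cs.length stride)

-- ===== PORT B =====
-- `[idx for idx, ch in enumerate(text) if ch in _SEPS]`
def pvSepIdx (cs : List Char) : List Int :=
  (PySem.List.enumerate cs 0).filterMap (fun p => if pvIsSep p.2 then some p.1 else none)

-- B's loop: boundary adjustment via bisect_right on the precomputed separator index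
def pvLoopB (cs : List Char) (seps : List Int) (slice_size half : Int) : List Int → List (String × Int × Int)
  | [] => []
  | i :: rest =>
    let n : Int := cs.length
    let start := i
    let e0 := min (i + slice_size) n
    let e :=
      if e0 < n ∧ e0 - start > half then
        let j := PySem.List.bisectRight seps e0
        if 0 < j ∧ seps.getD (j - 1) 0 > start + half then seps.getD (j - 1) 0 + 1 else e0
      else e0
    (String.ofList (PySem.List.slice cs (some start) (some e)), start, e) ::
      (if e = n then [] else pvLoopB cs seps slice_size half rest)

def fixed_slice_py_alt (text : String) (slice_size : Int) (overlap : Int) : List (String × Int × Int) :=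
  let cs := text.toList
  let seps := pvSepIdx cs
  let stride := slice_size - overlap
  let half := PySem.Int.floordiv stride 2
  pvLoopB cs seps slice_size half (PySem.List.pyRange 0 cs.length stride)

-- ===== PRECONDITION & SPEC =====
-- Pre_ excludes only slice_size = overlap (stride 0), where Python's range(0, len, 0) raises ValueError.
def Pre_fixed_slice_py (text : String) (slice_size : Int) (overlap : Int) : Prop :=
  slice_size ≠ overlap
instance (text : String) (slice_size : Int) (overlap : Int) : Decidable (Pre_fixed_slice_py text slice_size overlap) := by unfold Pre_fixed_slice_py; infer_instance

def pvWitness_fixed_slice_py : String × Int × Int := ("hello world, this is a test", 10, 3)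

def Spec_fixed_slice_py (text : String) (slice_size : Int) (overlap : Int) (out : List (String × Int × Int)) : Prop := out = fixed_slice_py_alt text slice_size overlap
instance (text : String) (slice_size : Int) (overlap : Int) (out : List (String × Int × Int)) : Decidable (Spec_fixed_slice_py text slice_size overlap out) := by unfold Spec_fixed_slice_py; infer_instance

-- ===== CLAIM (what is proved, stated in full; the proofs are below) =====
def Claim_equal_fixed_slice_py : Prop := ∀ (text : String) (slice_size : Int) (overlap : Int), Dom_fixed_slice_py text slice_size overlap → Pre_fixed_slice_py text slice_size overlap → Spec_fixed_slice_py text slice_size overlap (fixed_slice_py text slice_size overlap)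

-- ===== LEMMAS AND PROOFS =====

-- membership description of the separator index
lemma pvSepIdx_mem (cs : List Char) (s : Int) :
    s ∈ pvSepIdx cs ↔ ∃ (k : Nat) (h : k < cs.length), s = (k : Int) ∧ pvIsSep cs[k] := by
  unfold pvSepIdx
  rw [List.mem_filterMap]
  constructor
  · rintro ⟨p, hp, hf⟩
    rw [PySem.List.mem_enumerate_iff] at hp
    obtain ⟨k, hk, rfl⟩ := hp
    by_cases hsep : pvIsSep cs[k] <;> simp [hsep] at hf
    exact ⟨k, hk, hf.symm, hsep⟩
  · rintro ⟨k, hk, rfl, hsep⟩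
    refine ⟨((k : Int), cs[k]), ?_, by simp [hsep]⟩
    rw [PySem.List.mem_enumerate_iff]
    exact ⟨k, hk, by simp⟩

-- the separator index is sorted
lemma pvSepIdx_sorted (cs : List Char) : (pvSepIdx cs).Pairwise (· ≤ ·) := by
  unfold pvSepIdx
  apply List.Pairwise.filterMap (R := fun (p q : Int × Char) => p.1 < q.1)
  · intro a b hab x hx y hy
    split_ifs at hx hy with h1 h2 <;> simp_all
    omega
  · exact PySem.List.pairwise_lt_enumerate cs 0

-- A's probe test is separator-index membership, for in-range nonnegative r
lemma pvProbe_iff (cs : List Char) (r : Int) (h0 : 0 ≤ r) (hr : r < (cs.length : Int)) :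
    (((PySem.List.pyGet? cs r).map pvIsSep).getD false = true) ↔ r ∈ pvSepIdx cs := by
  rw [PySem.List.pyGet?_eq_some_getElem cs h0 hr, pvSepIdx_mem]
  constructor
  · intro h
    exact ⟨r.toNat, by omega, by omega, by simpa using h⟩
  · rintro ⟨k, hk, rfl, hsep⟩
    simpa using hsep

-- A's backward scan, success case: it returns the largest separator position in (lo, p]
lemma pvScanA_some (cs : List Char) (lo p q : Int) (h0 : 0 ≤ lo) (hp : p < (cs.length : Int))
    (h : pvScanA cs lo p = some q) :
    lo < q ∧ q ≤ p ∧ q ∈ pvSepIdx cs ∧ ∀ r, q < r → r ≤ p → r ∉ pvSepIdx cs := by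
  induction p using pvScanA.induct (cs := cs) (lo := lo) with
  | case1 p hlt htest =>
    rw [pvScanA, dif_pos hlt, if_pos htest] at h
    obtain rfl : p = q := by injection h
    exact ⟨hlt, le_refl _, (pvProbe_iff cs p (by omega) hp).mp htest, by omega⟩
  | case2 p hlt htest ih =>
    rw [pvScanA, dif_pos hlt, if_neg htest] at h
    obtain ⟨h1, h2, h3, h4⟩ := ih (by omega) h
    refine ⟨h1, by omega, h3, ?_⟩
    intro r hqr hrp hmem
    rcases eq_or_lt_of_le hrp with rfl | hlt2
    · exact absurd ((pvProbe_iff cs r (by omega) hp).mpr hmem) (by simpa using htest)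
    · exact h4 r hqr (by omega) hmem
  | case3 p hlt =>
    rw [pvScanA, dif_neg hlt] at h
    exact absurd h (by simp)

-- A's backward scan, failure case: there is no separator position in (lo, p]
lemma pvScanA_none (cs : List Char) (lo p : Int) (h0 : 0 ≤ lo) (hp : p < (cs.length : Int))
    (h : pvScanA cs lo p = none) :
    ∀ r, lo < r → r ≤ p → r ∉ pvSepIdx cs := by
  induction p using pvScanA.induct (cs := cs) (lo := lo) with
  | case1 p hlt htest =>
    rw [pvScanA, dif_pos hlt, if_pos htest] at h
    exact absurd h (by simp)
  | case2 p hlt htest ih =>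
    rw [pvScanA, dif_pos hlt, if_neg htest] at h
    intro r hlr hrp hmem
    rcases eq_or_lt_of_le hrp with rfl | hlt2
    · exact absurd ((pvProbe_iff cs r (by omega) hp).mpr hmem) (by simpa using htest)
    · exact ih (by omega) h r hlr (by omega) hmem
  | case3 p hlt =>
    intro r hlr hrp _
    omega

-- the heart: A's backward scan and B's bisect_right lookup adjust the end identically
lemma pvEnd_eq (cs : List Char) (lo e0 : Int) (h0 : 0 ≤ lo) (he : e0 < (cs.length : Int)) :
    (match pvScanA cs lo e0 with
     | some p => p + 1
     | none => e0) =
    (let j := PySem.List.bisectRight (pvSepIdx cs) e0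
     if 0 < j ∧ (pvSepIdx cs).getD (j - 1) 0 > lo then (pvSepIdx cs).getD (j - 1) 0 + 1 else e0) := by
  set S := pvSepIdx cs with hS
  obtain ⟨hj_le, hj_lo, hj_hi⟩ := PySem.List.bisectRight_spec S e0 (pvSepIdx_sorted cs)
  set j := PySem.List.bisectRight S e0 with hj
  cases hscan : pvScanA cs lo e0 with
  | some q =>
    obtain ⟨hq1, hq2, hq3, hq4⟩ := pvScanA_some cs lo e0 q h0 he hscan
    rw [← hS] at hq3 hq4
    obtain ⟨k, hk, hSk⟩ := List.getElem_of_mem hq3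
    have hkj : k < j := by
      by_contra hle
      have := hj_hi k hk (by omega)
      omega
    have hj1 : j - 1 < S.length := by omega
    have hSj1_le : S[j-1] ≤ e0 := hj_lo (j-1) hj1 (by omega)
    have hSj1_mem : S[j-1] ∈ S := List.getElem_mem hj1
    have hsorted := (List.pairwise_iff_getElem).mp (pvSepIdx_sorted cs)
    rw [← hS] at hsorted
    have hSj1_eq : S[j-1] = q := by
      rcases lt_trichotomy S[j-1] q with hlt | heq | hgt
      · rcases Nat.lt_or_ge k (j-1) with hk' | hk'
        · have := hsorted k (j-1) hk hj1 hk'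
          omega
        · have : k = j - 1 := by omega
          subst this; omega
      · exact heq
      · exact absurd hSj1_mem (hq4 S[j-1] hgt hSj1_le)
    simp only []
    rw [if_pos ⟨by omega, by rw [List.getD_eq_getElem S 0 hj1]; omega⟩, List.getD_eq_getElem S 0 hj1, hSj1_eq]
  | none =>
    have hno := pvScanA_none cs lo e0 h0 he hscan
    rw [← hS] at hno
    simp only []
    rw [if_neg]
    rintro ⟨hj0, hgt⟩
    have hj1 : j - 1 < S.length := by omega
    rw [List.getD_eq_getElem S 0 hj1] at hgt
    have hle : S[j-1] ≤ e0 := hj_lo (j-1) hj1 (by omega)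
    exact hno S[j-1] hgt hle (List.getElem_mem hj1)

-- the two loops agree step by step
lemma pvLoop_eq (cs : List Char) (slice_size stride : Int)
    (hhalf : 0 ≤ PySem.Int.floordiv stride 2) :
    ∀ l : List Int, (∀ i ∈ l, 0 ≤ i) →
      pvLoopA cs slice_size stride l =
        pvLoopB cs (pvSepIdx cs) slice_size (PySem.Int.floordiv stride 2) l := by
  intro l
  induction l with
  | nil => intro _; rfl
  | cons i rest ih =>
    intro hl
    have hi : (0:Int) ≤ i := hl i (by simp)
    have hrest := fun x hx => hl x (List.mem_cons_of_mem _ hx)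
    simp only [pvLoopA, pvLoopB]
    have hend :
        (if min (i + slice_size) (cs.length : Int) < (cs.length : Int) ∧
              min (i + slice_size) (cs.length : Int) - i > PySem.Int.floordiv stride 2 then
            match pvScanA cs (i + PySem.Int.floordiv stride 2) (min (i + slice_size) (cs.length : Int)) with
            | some p => p + 1
            | none => min (i + slice_size) (cs.length : Int)
          else min (i + slice_size) (cs.length : Int)) =
        (if min (i + slice_size) (cs.length : Int) < (cs.length : Int) ∧
              min (i + slice_size) (cs.length : Int) - i > PySem.Int.floordiv stride 2 then
            let j := PySem.List.bisectRight (pvSepIdx cs) (min (i + slice_size) (cs.length : Int))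
            if 0 < j ∧ (pvSepIdx cs).getD (j - 1) 0 > i + PySem.Int.floordiv stride 2 then
              (pvSepIdx cs).getD (j - 1) 0 + 1
            else min (i + slice_size) (cs.length : Int)
          else min (i + slice_size) (cs.length : Int)) := by
      by_cases hg : min (i + slice_size) (cs.length : Int) < (cs.length : Int) ∧
          min (i + slice_size) (cs.length : Int) - i > PySem.Int.floordiv stride 2
      · rw [if_pos hg, if_pos hg]
        exact pvEnd_eq cs (i + PySem.Int.floordiv stride 2) _ (by omega) hg.1
      · rw [if_neg hg, if_neg hg]
    rw [hend, ih hrest]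

-- a positive-length range with negative step is empty
lemma pvRange_neg_empty (n : Nat) (s : Int) (hs : s < 0) :
    PySem.List.pyRange 0 (n : Int) s = [] := by
  simp only [PySem.List.pyRange]
  split_ifs with h1 h2 h3 <;> first | rfl | omega

-- ===== VERDICT (by name: the statement is the Claim_ definition above) =====
theorem fixed_slice_py_spec : Claim_equal_fixed_slice_py := by
  intro text slice_size overlap _hdom hpre
  unfold Spec_fixed_slice_py
  show fixed_slice_py text slice_size overlap = _
  simp only [fixed_slice_py, fixed_slice_py_alt]
  set cs := text.toList with hcs
  set stride := slice_size - overlap with hst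
  have hstride : stride ≠ 0 := by unfold Pre_fixed_slice_py at hpre; omega
  rcases lt_or_gt_of_ne hstride with hneg | hpos
  · rw [pvRange_neg_empty cs.length stride hneg]
    rfl
  · apply pvLoop_eq
    · have := PySem.Int.floordiv_eq_ediv_of_pos (a := stride) (by omega : (0:Int) < 2)
      rw [this]; positivity
    · intro i hi
      rw [PySem.List.mem_pyRange_iff_of_pos hpos] at hi
      exact hi.1
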